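-- pv_equiv track=rewrite | github.com/chizhang9135/cse123 | q5.py | update_distance_vectors
-- ===== SOURCE A (Python) =====
-- def update_distance_vectors(distance_vectors, network_topology):
--     new_distance_vectors = {router: {} for router in distance_vectors}
--     for router in distance_vectors:
--         for destination in distance_vectors[router]:
--             # Start with the current known distance to the destination
--             min_distance = distance_vectors[router][destination]
--             # Check if any neighbor provides a shorter path to the destination
--             for neighbor in network_topology[router]:
--                 if destination in distance_vectors[neighbor]:
--                     new_distance = network_topology[router][neighbor] + distance_vectors[neighbor][destination]
--                     min_distance = min(min_distance, new_distance)
--             new_distance_vectors[router][destination] = min_distance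
--     return new_distance_vectors
-- ===== SOURCE B (Python) =====
-- def update_distance_vectors(distance_vectors, network_topology):
--     # Different strategy: build an inverted index destination -> [(holder, dist), ...]
--     # over all vectors in one pass, then compute each entry as the min over a
--     # candidate list drawn from the index (holders that are neighbours), instead of
--     # scanning the router's neighbours with a running min per destination.
--     index = {}
--     for holder, vector in distance_vectors.items():
--         for destination, dist in vector.items():
--             index.setdefault(destination, []).append((holder, dist))
--     return {
--         router: {
--             destination: min(
--                 [dist]
--                 + [network_topology[router][holder] + hdist
--                    for holder, hdist in index[destination]
--                    if holder in network_topology[router]]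
--             )
--             for destination, dist in vector.items()
--         }
--         for router, vector in distance_vectors.items()
--     }
-- ===== Notes on version B (the rewrite author's own statement) =====
-- stated objective: alternative
-- what changed: B first builds an inverted index destination -> [(holder, dist)] over all distance vectors in one pass, then computes each table entry as the min of a materialized candidate list drawn from the index (holders of that destination that are neighbours), instead of A's per-destination running-min scan over the router's neighbours with a membership test in each neighbour's vector.
import Mathlib
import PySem

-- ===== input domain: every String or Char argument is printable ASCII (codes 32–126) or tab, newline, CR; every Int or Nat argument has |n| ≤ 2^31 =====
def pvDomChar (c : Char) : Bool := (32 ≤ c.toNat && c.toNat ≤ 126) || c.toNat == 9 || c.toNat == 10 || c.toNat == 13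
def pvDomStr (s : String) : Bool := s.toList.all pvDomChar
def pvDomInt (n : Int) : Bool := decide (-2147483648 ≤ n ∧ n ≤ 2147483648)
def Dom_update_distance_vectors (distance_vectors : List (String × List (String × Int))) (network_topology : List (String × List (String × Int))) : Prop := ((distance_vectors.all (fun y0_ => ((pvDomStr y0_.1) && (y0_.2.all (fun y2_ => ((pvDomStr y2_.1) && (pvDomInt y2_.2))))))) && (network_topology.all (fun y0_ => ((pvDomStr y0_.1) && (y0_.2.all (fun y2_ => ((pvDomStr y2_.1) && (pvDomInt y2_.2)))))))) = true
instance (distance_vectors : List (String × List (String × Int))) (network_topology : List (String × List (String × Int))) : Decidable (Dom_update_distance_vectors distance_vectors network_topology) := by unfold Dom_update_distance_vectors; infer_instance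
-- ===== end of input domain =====

-- B is an 'alternative': it builds an inverted index destination → [(holder, dist)] once and
-- takes a min over candidate lists drawn from the index, instead of A's running-min scan over
-- the router's neighbours per destination; same return value, similar cost.

-- shared type bridge: a Python dict-of-dicts argument, read as nested PySem.Dicts
def pvDict2 (l : List (String × List (String × Int))) : PySem.Dict String (PySem.Dict String Int) :=
  PySem.Dict.ofList (l.map (fun p => (p.1, PySem.Dict.ofList p.2)))

-- ===== PORT A =====
-- literal transliteration of A; Python raises KeyError exactly where the getD defaults
-- below would fire, and Pre_update_distance_vectors excludes those inputs
def update_distance_vectors (distance_vectors : List (String × List (String × Int))) (network_topology : List (String × List (String × Int))) : List (String × List (String × Int)) :=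
  let dvd := pvDict2 distance_vectors
  let topod := pvDict2 network_topology
  -- new_distance_vectors = {router: {} for router in distance_vectors}
  let new0 : PySem.Dict String (PySem.Dict String Int) :=
    dvd.keys.foldl (fun d r => d.insert r PySem.Dict.empty) PySem.Dict.empty
  let new := dvd.keys.foldl (fun new r =>
    (dvd.getD r PySem.Dict.empty).keys.foldl (fun new dst =>
      let min0 := (dvd.getD r PySem.Dict.empty).getD dst 0
      let md := (topod.getD r PySem.Dict.empty).items.foldl (fun md nc =>
        if (dvd.getD nc.1 PySem.Dict.empty).contains dst then
          min md (nc.2 + (dvd.getD nc.1 PySem.Dict.empty).getD dst 0)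
        else md) min0
      new.modify r PySem.Dict.empty (fun row => row.insert dst md)) new) new0
  new.items.map (fun p => (p.1, p.2.items))

-- ===== PORT B =====
-- the inverted index: index.setdefault(destination, []).append((holder, dist))
def pvBuildIndex (dvd : PySem.Dict String (PySem.Dict String Int)) : PySem.Dict String (List (String × Int)) :=
  dvd.items.foldl (fun idx rv =>
    rv.2.items.foldl (fun idx dd =>
      idx.modify dd.1 [] (fun l => l ++ [(rv.1, dd.2)])) idx) PySem.Dict.empty

def update_distance_vectors_alt (distance_vectors : List (String × List (String × Int))) (network_topology : List (String × List (String × Int))) : List (String × List (String × Int)) :=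
  let dvd := pvDict2 distance_vectors
  let topod := pvDict2 network_topology
  let idx := pvBuildIndex dvd
  dvd.items.map (fun rv =>
    (rv.1, rv.2.items.map (fun dd =>
      (dd.1,
        -- min([dist] + [topo[router][holder] + hdist for holder, hdist in index[destination] if holder in topo[router]])
        let cands := dd.2 :: ((idx.getD dd.1 []).foldl (fun acc hd =>
          if (topod.getD rv.1 PySem.Dict.empty).contains hd.1 then
            acc ++ [(topod.getD rv.1 PySem.Dict.empty).getD hd.1 0 + hd.2]
          else acc) [])
        match PySem.List.min? cands (fun x => x) with
        | some m => m
        | none => 0))))   -- unreachable: cands is nonempty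

-- ===== PRECONDITION & SPEC =====
-- exactly the inputs on which A returns: every router with a nonempty vector must appear in
-- the topology and every one of its listed neighbours must have a distance vector; on the
-- complement A raises KeyError (lazy reads: an empty vector never touches the topology)
def Pre_update_distance_vectors (distance_vectors : List (String × List (String × Int))) (network_topology : List (String × List (String × Int))) : Prop :=
  ∀ p ∈ (pvDict2 distance_vectors).items, p.2.items ≠ [] →
    ((pvDict2 network_topology).contains p.1 = true ∧
     ∀ n ∈ ((pvDict2 network_topology).getD p.1 PySem.Dict.empty).keys,
       (pvDict2 distance_vectors).contains n = true)
instance (distance_vectors : List (String × List (String × Int))) (network_topology : List (String × List (String × Int))) : Decidable (Pre_update_distance_vectors distance_vectors network_topology) := by unfold Pre_update_distance_vectors; infer_instance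

def pvWitness_update_distance_vectors : (List (String × List (String × Int))) × (List (String × List (String × Int))) :=
  ([("a", [("a", 0), ("b", 3)]), ("b", [("a", 3), ("b", 0)])],
   [("a", [("b", 1)]), ("b", [("a", 1)])])

def Spec_update_distance_vectors (distance_vectors : List (String × List (String × Int))) (network_topology : List (String × List (String × Int))) (out : List (String × List (String × Int))) : Prop := out = update_distance_vectors_alt distance_vectors network_topology
instance (distance_vectors : List (String × List (String × Int))) (network_topology : List (String × List (String × Int))) (out : List (String × List (String × Int))) : Decidable (Spec_update_distance_vectors distance_vectors network_topology out) := by unfold Spec_update_distance_vectors; infer_instance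

-- ===== CLAIM (what is proved, stated in full; the proofs are below) =====
def Claim_equal_update_distance_vectors : Prop := ∀ (distance_vectors : List (String × List (String × Int))) (network_topology : List (String × List (String × Int))), Dom_update_distance_vectors distance_vectors network_topology → Pre_update_distance_vectors distance_vectors network_topology → Spec_update_distance_vectors distance_vectors network_topology (update_distance_vectors distance_vectors network_topology)

-- ===== LEMMAS AND PROOFS =====

-- values of an insert-fold are among the inserted values and the initial ones
theorem pv_values_foldl_insert {ν : Type} (P : ν → Prop) (l : List (String × ν))
    (d : PySem.Dict String ν) (hd : ∀ w ∈ d.values, P w) (hl : ∀ p ∈ l, P p.2) :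
    ∀ w ∈ (l.foldl (fun d p => d.insert p.1 p.2) d).values, P w := by
  induction l generalizing d with
  | nil => exact hd
  | cons p rest ih =>
    refine ih (d.insert p.1 p.2) (fun w hw => ?_) (fun q hq => hl q (List.mem_cons_of_mem _ hq))
    rcases PySem.Dict.mem_values_insert d p.1 p.2 w hw with h | h
    · exact h ▸ hl p (List.mem_cons_self ..)
    · exact hd w h

-- every row looked up in a pvDict2 has Nodup keys
theorem pv_row_nodup (l : List (String × List (String × Int))) (k : String) :
    ((pvDict2 l).getD k PySem.Dict.empty).keys.Nodup := by
  have hval : ∀ w ∈ (pvDict2 l).values, w.keys.Nodup := by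
    refine pv_values_foldl_insert (fun v => v.keys.Nodup) (l.map (fun p => (p.1, PySem.Dict.ofList p.2))) PySem.Dict.empty (by simp [PySem.Dict.values, PySem.Dict.empty]) ?_
    intro p hp
    rcases List.mem_map.mp hp with ⟨q, _, rfl⟩
    exact PySem.Dict.nodup_keys_ofList q.2
  cases h : (pvDict2 l).get? k with
  | none =>
    rw [PySem.Dict.getD_of_get?_eq_none _ _ h]
    simp [PySem.Dict.keys_empty]
  | some v =>
    rw [PySem.Dict.getD_of_get?_eq_some _ _ h]
    refine hval v ?_
    have := PySem.Dict.mem_items_of_get?_eq_some _ h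
    exact List.mem_map.mpr ⟨(k, v), this, rfl⟩

-- a running-min loop with a test IS a min-fold over the filtered mapped list
theorem pv_foldl_if_min {α : Type} (p : α → Bool) (f : α → Int) (l : List α) (b : Int) :
    l.foldl (fun md x => if p x then min md (f x) else md) b
      = ((l.filter p).map f).foldl min b := by
  induction l generalizing b with
  | nil => rfl
  | cons x t ih =>
    by_cases h : p x = true
    · simp [h, ih]
    · simp only [Bool.not_eq_true] at h
      simp [h, ih]

-- filtering a Nodup list for one key
theorem pv_filter_beq_nodup (l : List String) (c : String) (h : l.Nodup) :
    l.filter (fun x => x == c) = if c ∈ l then [c] else [] := by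
  induction l with
  | nil => simp
  | cons a t ih =>
    simp only [List.nodup_cons] at h
    by_cases ha : a = c
    · subst ha
      have ht : a ∉ t := h.1
      simp [ih h.2, ht]
    · have hb : (a == c) = false := by simp [ha]
      simp [hb, ih h.2, Ne.symm ha]

-- the items of a row filtered for one destination
theorem pv_items_filter_key (d : PySem.Dict String Int) (c : String) (h : d.keys.Nodup) :
    d.items.filter (fun dd => dd.1 == c)
      = if d.contains c then [(c, d.getD c 0)] else [] := by
  rw [PySem.Dict.items_eq_map_keys d h 0, List.filter_map]
  have hco : ((fun dd : String × Int => dd.1 == c) ∘ (fun k => (k, d.getD k 0))) = (fun k => k == c) := rfl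
  rw [hco, pv_filter_beq_nodup d.keys c h, PySem.Dict.contains_eq_decide_mem_keys]
  by_cases hc : c ∈ d.keys <;> simp [hc]

-- flatMap of an if-singleton is filter-map
theorem pv_flatMap_ite {α β : Type} (p : α → Bool) (g : α → β) (l : List α) :
    l.flatMap (fun x => if p x then [g x] else []) = (l.filter p).map g := by
  induction l with
  | nil => rfl
  | cons a t ih =>
    by_cases h : p a = true
    · simp [h, ih]
    · simp only [Bool.not_eq_true] at h
      simp [h, ih]

-- characterisation of the inverted index at one destination
theorem pv_index_getD (dvd : PySem.Dict String (PySem.Dict String Int)) (c : String)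
    (hval : ∀ rv ∈ dvd.items, rv.2.keys.Nodup) :
    (pvBuildIndex dvd).getD c []
      = (dvd.items.filter (fun rv => rv.2.contains c)).map (fun rv => (rv.1, rv.2.getD c 0)) := by
  unfold pvBuildIndex
  have hfold : dvd.items.foldl (fun idx rv =>
      rv.2.items.foldl (fun idx dd => idx.modify dd.1 [] (fun l => l ++ [(rv.1, dd.2)])) idx)
      (PySem.Dict.empty : PySem.Dict String (List (String × Int)))
    = (dvd.items.flatMap (fun rv => rv.2.items.map (fun dd => (dd.1, (rv.1, dd.2))))).foldl
        (fun idx q => idx.modify q.1 [] (fun l => l ++ [q.2])) PySem.Dict.empty := by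
    rw [List.foldl_flatMap]
    simp only [List.foldl_map]
  rw [hfold, PySem.Dict.getD_foldl_modify_append, PySem.Dict.getD_empty]
  rw [List.filter_flatMap, List.map_flatMap]
  have hcong : ∀ rv ∈ dvd.items,
      (((rv.2.items.map (fun dd => (dd.1, (rv.1, dd.2)))).filter (fun q => q.1 == c)).map Prod.snd)
        = if rv.2.contains c then [(rv.1, rv.2.getD c 0)] else [] := by
    intro rv hrv
    rw [List.filter_map, List.map_map]
    have : ((fun q : String × (String × Int) => q.1 == c) ∘ (fun dd : String × Int => (dd.1, (rv.1, dd.2)))) = (fun dd : String × Int => dd.1 == c) := rfl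
    rw [this, pv_items_filter_key rv.2 c (hval rv hrv)]
    split_ifs <;> simp
  rw [List.flatMap_congr hcong, pv_flatMap_ite, List.nil_append]

-- A's inner destination loop only ever writes the row of its own router
theorem pvA_inner_get?_ne (dsts : List String) (m : String → Int) (r k : String) (hk : k ≠ r)
    (new : PySem.Dict String (PySem.Dict String Int)) :
    (dsts.foldl (fun new dst => new.modify r PySem.Dict.empty (fun row => row.insert dst (m dst))) new).get? k
      = new.get? k := by
  induction dsts generalizing new with
  | nil => rfl
  | cons dst rest ih =>
    simp only [List.foldl_cons]
    rw [ih]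
    show (new.insert r _).get? k = new.get? k
    exact PySem.Dict.get?_insert_of_ne _ _ hk

theorem pvA_inner_getD (dsts : List String) (m : String → Int) (r : String)
    (new : PySem.Dict String (PySem.Dict String Int)) :
    (dsts.foldl (fun new dst => new.modify r PySem.Dict.empty (fun row => row.insert dst (m dst))) new).getD r PySem.Dict.empty
      = dsts.foldl (fun row dst => row.insert dst (m dst)) (new.getD r PySem.Dict.empty) := by
  induction dsts generalizing new with
  | nil => rfl
  | cons dst rest ih =>
    simp only [List.foldl_cons]
    rw [ih]
    rw [PySem.Dict.getD_modify_self]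

theorem pvA_inner_keys (dsts : List String) (m : String → Int) (r : String)
    (new : PySem.Dict String (PySem.Dict String Int)) (hr : new.contains r = true) :
    (dsts.foldl (fun new dst => new.modify r PySem.Dict.empty (fun row => row.insert dst (m dst))) new).keys
      = new.keys := by
  induction dsts generalizing new with
  | nil => rfl
  | cons dst rest ih =>
    simp only [List.foldl_cons]
    rw [ih]
    · show (new.insert r _).keys = new.keys
      exact PySem.Dict.keys_insert_of_contains _ _ hr
    · show (new.insert r _).contains r = true
      rw [PySem.Dict.contains_insert]; simp

-- A's outer loop: each router's row ends up as its own destination fold from {}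
theorem pvA_outer (dsts : String → List String) (m : String → String → Int)
    (ks' : List String) (hnd : ks'.Nodup) (new : PySem.Dict String (PySem.Dict String Int))
    (hemp : ∀ r ∈ ks', new.get? r = some PySem.Dict.empty) :
    (ks'.foldl (fun new r => (dsts r).foldl (fun new dst => new.modify r PySem.Dict.empty (fun row => row.insert dst (m r dst))) new) new).keys = new.keys ∧
    ∀ k, (ks'.foldl (fun new r => (dsts r).foldl (fun new dst => new.modify r PySem.Dict.empty (fun row => row.insert dst (m r dst))) new) new).get? k
      = if k ∈ ks' then some ((dsts k).foldl (fun row dst => row.insert dst (m k dst)) PySem.Dict.empty) else new.get? k := by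
  induction ks' generalizing new with
  | nil => simp
  | cons r rest ih =>
    simp only [List.nodup_cons] at hnd
    simp only [List.foldl_cons]
    have hrc : new.contains r = true := by
      rw [PySem.Dict.contains_eq_isSome_get?, hemp r (List.mem_cons_self ..)]; rfl
    have hkeys' : ((dsts r).foldl (fun new dst => new.modify r PySem.Dict.empty (fun row => row.insert dst (m r dst))) new).keys = new.keys :=
      pvA_inner_keys _ _ _ _ hrc
    have hemp' : ∀ r' ∈ rest, ((dsts r).foldl (fun new dst => new.modify r PySem.Dict.empty (fun row => row.insert dst (m r dst))) new).get? r' = some PySem.Dict.empty := by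
      intro r' hr'
      rw [pvA_inner_get?_ne _ _ _ _ (fun he => hnd.1 (by rw [← he]; exact hr'))]
      exact hemp r' (List.mem_cons_of_mem _ hr')
    obtain ⟨ihk, ihg⟩ := ih hnd.2 _ hemp'
    refine ⟨ihk.trans hkeys', fun k => ?_⟩
    rw [ihg k]
    by_cases hkr : k ∈ rest
    · simp [hkr]
    · simp only [hkr, if_false]
      by_cases hke : k = r
      · subst hke
        simp only [List.mem_cons, true_or, if_true]
        have hgd := pvA_inner_getD (dsts k) (m k) k new
        have hsome : new.getD k PySem.Dict.empty = PySem.Dict.empty :=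
          PySem.Dict.getD_of_get?_eq_some _ _ (hemp k (List.mem_cons_self ..))
        rw [hsome] at hgd
        have hco : ((dsts k).foldl (fun new dst => new.modify k PySem.Dict.empty (fun row => row.insert dst (m k dst))) new).contains k = true := by
          rw [PySem.Dict.contains_eq_decide_mem_keys, hkeys', ← PySem.Dict.contains_eq_decide_mem_keys]
          exact hrc
        cases hg : ((dsts k).foldl (fun new dst => new.modify k PySem.Dict.empty (fun row => row.insert dst (m k dst))) new).get? k with
        | none => rw [(PySem.Dict.get?_eq_none_iff_contains _ _).mp hg] at hco; cases hco
        | some w =>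
          have := PySem.Dict.getD_of_get?_eq_some _ PySem.Dict.empty hg
          rw [hgd] at this
          rw [this]
      · have : k ∉ r :: rest := by simp [hke, hkr]
        simp only [this, if_false]
        exact pvA_inner_get?_ne _ _ _ _ hke _

-- per-destination agreement: A's running min over neighbours equals B's min over the
-- candidate list drawn from the inverted index
theorem pv_value_eq (dvd topod : PySem.Dict String (PySem.Dict String Int))
    (hk : dvd.keys.Nodup) (hval : ∀ rv ∈ dvd.items, rv.2.keys.Nodup)
    (hrowT : ∀ k, (topod.getD k PySem.Dict.empty).keys.Nodup)
    (r c : String) (base : Int) :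
    (topod.getD r PySem.Dict.empty).items.foldl (fun md nc =>
        if (dvd.getD nc.1 PySem.Dict.empty).contains c then
          min md (nc.2 + (dvd.getD nc.1 PySem.Dict.empty).getD c 0)
        else md) base
      = (((pvBuildIndex dvd).getD c []).foldl (fun acc hd =>
          if (topod.getD r PySem.Dict.empty).contains hd.1 then
            acc ++ [(topod.getD r PySem.Dict.empty).getD hd.1 0 + hd.2]
          else acc) []).foldl min base := by
  set row := topod.getD r PySem.Dict.empty with hrow
  have G : String → Int := fun n => row.getD n 0 + (dvd.getD n PySem.Dict.empty).getD c 0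
  -- A side
  rw [pv_foldl_if_min]
  rw [PySem.Dict.items_eq_map_keys row (hrowT r) 0, List.filter_map, List.map_map]
  -- B side
  rw [PySem.List.foldl_append_if, List.nil_append]
  rw [pv_index_getD dvd c hval, List.filter_map, List.map_map]
  rw [PySem.Dict.items_eq_map_keys dvd hk PySem.Dict.empty, List.filter_map]
  rw [List.filter_map, List.map_map, List.filter_filter]
  simp only [Function.comp_def]
  refine List.Perm.foldl_op_eq (List.Perm.map _ ?_)
  refine (List.perm_ext_iff_of_nodup (List.Nodup.filter _ (hrowT r)) (List.Nodup.filter _ hk)).mpr ?_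
  intro a
  simp only [List.mem_filter, Bool.and_eq_true]
  constructor
  · rintro ⟨ha, hc⟩
    have hmem : a ∈ dvd.keys := by
      by_contra hno
      have : dvd.contains a = false := by
        rw [PySem.Dict.contains_eq_decide_mem_keys]; simp [hno]
      rw [PySem.Dict.getD_of_not_contains _ _ this] at hc
      rw [PySem.Dict.contains_empty] at hc
      exact Bool.false_ne_true hc
    exact ⟨hmem, (PySem.Dict.contains_iff_mem_keys _ _).mpr ha, hc⟩
  · rintro ⟨_, hr, hc⟩
    exact ⟨(PySem.Dict.contains_iff_mem_keys _ _).mp hr, hc⟩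


-- ===== VERDICT (by name: the statement is the Claim_ definition above) =====
theorem update_distance_vectors_spec : Claim_equal_update_distance_vectors := by
  intro dv topo _ _
  unfold Spec_update_distance_vectors update_distance_vectors update_distance_vectors_alt
  simp only []
  have hksnd : (pvDict2 dv).keys.Nodup := PySem.Dict.nodup_keys_ofList _
  have hval : ∀ k, ((pvDict2 dv).getD k PySem.Dict.empty).keys.Nodup := pv_row_nodup dv
  have hvalT : ∀ k, ((pvDict2 topo).getD k PySem.Dict.empty).keys.Nodup := pv_row_nodup topo
  have hvalI : ∀ rv ∈ (pvDict2 dv).items, rv.2.keys.Nodup := by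
    intro rv hrv
    obtain ⟨k, v⟩ := rv
    have hg : (pvDict2 dv).getD k PySem.Dict.empty = v :=
      PySem.Dict.getD_of_mem_items _ hrv hksnd PySem.Dict.empty
    exact hg ▸ hval k
  have h0items := PySem.Dict.items_foldl_insert_fresh (pvDict2 dv).keys (fun r => r)
      (fun _ => (PySem.Dict.empty : PySem.Dict String Int)) PySem.Dict.empty
      (fun a _ => PySem.Dict.contains_empty a) (by simpa using hksnd)
  have h0keys : ((pvDict2 dv).keys.foldl (fun d r => d.insert r (PySem.Dict.empty : PySem.Dict String Int)) (PySem.Dict.empty : PySem.Dict String (PySem.Dict String Int))).keys = (pvDict2 dv).keys := by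
    show (((pvDict2 dv).keys.foldl (fun d r => d.insert r (PySem.Dict.empty : PySem.Dict String Int)) (PySem.Dict.empty : PySem.Dict String (PySem.Dict String Int))).items.map Prod.fst) = _
    rw [h0items]; simp [PySem.Dict.empty, Function.comp_def]
  have h0get : ∀ r ∈ (pvDict2 dv).keys, ((pvDict2 dv).keys.foldl (fun d r => d.insert r (PySem.Dict.empty : PySem.Dict String Int)) (PySem.Dict.empty : PySem.Dict String (PySem.Dict String Int))).get? r = some PySem.Dict.empty := by
    intro r hr
    refine PySem.Dict.get?_of_mem_items _ ?_ (by rw [h0keys]; exact hksnd)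
    rw [h0items]
    exact List.mem_append_right _ (List.mem_map.mpr ⟨r, hr, rfl⟩)
  obtain ⟨hKeys, hGet⟩ := pvA_outer (fun r => ((pvDict2 dv).getD r PySem.Dict.empty).keys)
      (fun r dst => ((pvDict2 topo).getD r PySem.Dict.empty).items.foldl (fun md nc =>
          if ((pvDict2 dv).getD nc.1 PySem.Dict.empty).contains dst then
            min md (nc.2 + ((pvDict2 dv).getD nc.1 PySem.Dict.empty).getD dst 0)
          else md) (((pvDict2 dv).getD r PySem.Dict.empty).getD dst 0))
      (pvDict2 dv).keys hksnd _ h0get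
  rw [PySem.Dict.items_eq_map_keys _ (by rw [hKeys, h0keys]; exact hksnd) PySem.Dict.empty,
      hKeys, h0keys]
  conv_rhs => rw [PySem.Dict.items_eq_map_keys (pvDict2 dv) hksnd PySem.Dict.empty]
  simp only [List.map_map]
  refine List.map_congr_left (fun r hr => ?_)
  simp only [Function.comp]
  have hg := hGet r
  simp only [hr, if_true] at hg
  rw [PySem.Dict.getD_of_get?_eq_some _ PySem.Dict.empty hg]
  refine congrArg (Prod.mk r) ?_
  -- A's rebuilt row, itemised
  rw [PySem.Dict.items_foldl_insert_fresh ((pvDict2 dv).getD r PySem.Dict.empty).keys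
      (fun d => d) _ PySem.Dict.empty (fun a _ => PySem.Dict.contains_empty a)
      (by simpa using hval r)]
  rw [show (PySem.Dict.empty : PySem.Dict String Int).items = [] from rfl, List.nil_append]
  -- B's row, itemised over the same keys
  rw [PySem.Dict.items_eq_map_keys ((pvDict2 dv).getD r PySem.Dict.empty) (hval r) 0,
      List.map_map]
  refine List.map_congr_left (fun d _ => ?_)
  simp only [Function.comp]
  refine congrArg (Prod.mk d) ?_
  rw [PySem.List.min?_id_cons]
  exact pv_value_eq (pvDict2 dv) (pvDict2 topo) hksnd hvalI hvalT r d _
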